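-- pv_equiv track=rewrite | github.com/noooey/solved | BOJ/1389.py | bacon
-- ===== SOURCE A (Python) =====
-- from collections import deque
--
-- def bacon(graph, root):
--     bacon = [0]*(len(graph)+1) # 베이컨수 저장하는 리스트, 인덱스 1부터 셀거라 1더해줌
--     visited = [False]*(len(graph)+1) # 방문 여부 표시 리스트
--     visited[root] = True # root는 방문처리
--     queue = deque([root])
--
--     while queue:
--         cur = queue.popleft() # 현재
--         for friend in graph[cur]: # 현재 사람의 친구들을 순회하면서
--             if visited[friend] is False: # 방문한 적이 없다면
--                 bacon[friend] = bacon[cur] + 1 # 현재 사람의 베이컨 수 + 1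
--                 visited[friend] = True # 방문 표시
--                 queue.append(friend) # 큐에 방문해야할 친구 추가
--
--     return sum(bacon)
-- ===== SOURCE B (Python) =====
-- def bacon(graph, root):
--     # Level-by-level (wave) BFS: no distance array, no queue; sum depth * level size.
--     visited = [False] * (len(graph) + 1)
--     visited[root] = True
--     frontier = [root]
--     depth = 0
--     total = 0
--     while frontier:
--         nxt = []
--         for node in frontier:
--             for friend in graph[node]:
--                 if not visited[friend]:
--                     visited[friend] = True
--                     nxt.append(friend)
--         depth += 1
--         total += depth * len(nxt)
--         frontier = nxt
--     return total
-- ===== Notes on version B (the rewrite author's own statement) =====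
-- stated objective: alternative
-- what changed: Replaces the distance-array + FIFO-queue BFS (sum of a per-node distance array) with a level-by-level wave BFS that keeps only a visited bit-array, the current frontier list, a depth counter and a running total (total += depth*len(next_frontier)); no distance array and no queue exist.
-- outside the precondition, e.g. on bacon({1: [-1]}, 1): A returns 0, B returns 0
import Mathlib
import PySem

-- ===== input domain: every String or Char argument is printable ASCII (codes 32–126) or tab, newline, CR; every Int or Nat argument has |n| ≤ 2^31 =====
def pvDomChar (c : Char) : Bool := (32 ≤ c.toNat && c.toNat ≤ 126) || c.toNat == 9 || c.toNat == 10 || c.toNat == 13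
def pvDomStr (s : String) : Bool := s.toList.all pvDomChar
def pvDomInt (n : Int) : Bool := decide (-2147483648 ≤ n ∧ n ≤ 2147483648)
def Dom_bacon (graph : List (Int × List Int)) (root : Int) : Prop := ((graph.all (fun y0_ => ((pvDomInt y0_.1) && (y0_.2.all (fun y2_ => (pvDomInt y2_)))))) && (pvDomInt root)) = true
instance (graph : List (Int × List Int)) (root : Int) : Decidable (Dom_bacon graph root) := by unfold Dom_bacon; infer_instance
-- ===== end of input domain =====

-- B replaces A's distance-array + FIFO-queue BFS by a level-by-level wave BFS (visited
-- array, frontier list, depth counter, running total): an alternative decomposition of the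
-- same task — no distance array and no queue.

-- Python's graph[k] (dict lookup, first match); a missing key is a KeyError, excluded by
-- Pre_bacon, so the [] default is never observed on admitted inputs.
def pyGraphGet (graph : List (Int × List Int)) (k : Int) : List Int :=
  (graph.lookup k).getD []

-- nodes reachable from root along dict-key edges (missing keys contribute no edges),
-- as the stabilised (K+1)-fold neighbour-closure, K = total number of listed neighbours.
-- Used only by Pre_bacon: Python A touches exactly these nodes.
def reachStep (graph : List (Int × List Int)) (S : List Int) : List Int :=
  PySem.List.dedup (S ++ S.flatMap (fun x => pyGraphGet graph x))

def reachSet (graph : List (Int × List Int)) (root : Int) : List Int :=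
  (reachStep graph)^[(graph.flatMap Prod.snd).length + 1] [root]

-- Python's index into a length-m list: a negative index wraps by +m.
-- Exact for -m ≤ x < m; Pre_bacon keeps every performed access in that range.
def pyIdx (m : Nat) (x : Int) : Nat := if x < 0 then (x + m).toNat else x.toNat

-- ===== PORT A =====
-- inner "for friend in graph[cur]" loop over state (bacon, visited, queue); m = len(graph)+1
-- is the length of both arrays.  The getD default true makes an (excluded, IndexError in
-- Python) out-of-range read skip the branch.
def visitA (m : Nat) (cur : Int) : List Int → List Int × List Bool × List Int → List Int × List Bool × List Int
  | [], st => st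
  | f :: fs, (bac, vis, q) =>
    if vis.getD (pyIdx m f) true = false then
      visitA m cur fs (bac.set (pyIdx m f) (bac.getD (pyIdx m cur) 0 + 1), vis.set (pyIdx m f) true, q ++ [f])
    else
      visitA m cur fs (bac, vis, q)

-- the "while queue" loop; fuel 2*len(graph)+4 is proved sufficient in main_sim below (each
-- enqueue marks a fresh cell of the length-(n+1) visited array), so fuel 0 is never reached.
def loopA (graph : List (Int × List Int)) : Nat → List Int × List Bool × List Int → List Int
  | 0, (bac, _, _) => bac
  | fuel+1, (bac, vis, q) =>
    match q with
    | [] => bac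
    | cur :: rest => loopA graph fuel (visitA (graph.length + 1) cur (pyGraphGet graph cur) (bac, vis, rest))

def bacon (graph : List (Int × List Int)) (root : Int) : Int :=
  (loopA graph (2 * graph.length + 4)
    (List.replicate (graph.length + 1) 0,
     (List.replicate (graph.length + 1) false).set (pyIdx (graph.length + 1) root) true,
     [root])).sum

-- ===== PORT B =====
-- inner "for friend in graph[node]" loop of one level: mark and collect the next frontier.
def visitB (m : Nat) (visited : List Bool) (nxt : List Int) : List Int → List Bool × List Int
  | [] => (visited, nxt)
  | f :: fs =>
    if visited.getD (pyIdx m f) true = false then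
      visitB m (visited.set (pyIdx m f) true) (nxt ++ [f]) fs
    else
      visitB m visited nxt fs

-- the "for node in frontier" loop of one level.
def levelB (graph : List (Int × List Int)) : List Int → List Bool → List Int → List Bool × List Int
  | [], visited, nxt => (visited, nxt)
  | node :: rest, visited, nxt =>
    let p := visitB (graph.length + 1) visited nxt (pyGraphGet graph node)
    levelB graph rest p.1 p.2

-- the "while frontier" loop; fuel len(graph)+3 is proved sufficient in main_sim below (every
-- level but the last discovers a node), so fuel 0 is never reached.
def loopB (graph : List (Int × List Int)) : Nat → List Bool → List Int → Int → Int → Int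
  | 0, _, _, _, total => total
  | fuel+1, visited, frontier, depth, total =>
    match frontier with
    | [] => total
    | _ :: _ =>
      let p := levelB graph frontier visited []
      loopB graph fuel p.1 p.2 (depth + 1) (total + (depth + 1) * (p.2.length : Int))

def bacon_alt (graph : List (Int × List Int)) (root : Int) : Int :=
  loopB graph (graph.length + 3)
    ((List.replicate (graph.length + 1) false).set (pyIdx (graph.length + 1) root) true)
    [root] 0 0

-- ===== PRECONDITION & SPEC =====
-- Pre_ excludes duplicate dict keys (not expressible in a Python dict; which copy wins is
-- accidental) and requires every label in the reachable closure to lie in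
-- [-(len(graph)+1), len(graph)] and to be a dict key: outside that, A raises IndexError /
-- KeyError when it reaches the label — except for a label conflated away by negative-index
-- wraparound before it is dequeued, which A skips; the closure over-approximates the set A
-- actually touches there, a stated narrowing (A's touched set is not closed-form).
def Pre_bacon (graph : List (Int × List Int)) (root : Int) : Prop :=
  (graph.map Prod.fst).Nodup ∧
  ∀ x ∈ reachSet graph root,
    -(graph.length : Int) - 1 ≤ x ∧ x ≤ (graph.length : Int) ∧ x ∈ graph.map Prod.fst
instance (graph : List (Int × List Int)) (root : Int) : Decidable (Pre_bacon graph root) := by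
  unfold Pre_bacon; infer_instance

def pvWitness_bacon : (List (Int × List Int)) × Int := ([(0, [1]), (1, [0, 2]), (2, [])], 0)

def Spec_bacon (graph : List (Int × List Int)) (root : Int) (out : Int) : Prop := out = bacon_alt graph root
instance (graph : List (Int × List Int)) (root : Int) (out : Int) : Decidable (Spec_bacon graph root out) := by unfold Spec_bacon; infer_instance

-- ===== CLAIM (what is proved, stated in full; the proofs are below) =====
def Claim_equal_bacon : Prop := ∀ (graph : List (Int × List Int)) (root : Int), Dom_bacon graph root → Pre_bacon graph root → Spec_bacon graph root (bacon graph root)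

-- ===== LEMMAS AND PROOFS =====

theorem getD_set_of_ne {α : Type} (l : List α) (i j : Nat) (v d : α) (h : i ≠ j) :
    (l.set i v).getD j d = l.getD j d := by
  simp [List.getD, List.getElem?_set_ne h]

theorem getD_set_self {α : Type} (l : List α) (i : Nat) (v d : α) (h : i < l.length) :
    (l.set i v).getD i d = v := by
  simp [List.getD, h]

theorem sum_set_int (l : List Int) (i : Nat) (v : Int) (hi : i < l.length) :
    (l.set i v).sum = l.sum - l.getD i 0 + v := by
  induction l generalizing i with
  | nil => simp at hi
  | cons a t ih =>
    cases i with
    | zero => simp [List.sum_cons]; ring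
    | succ j =>
      simp only [List.set, List.sum_cons, List.getD_cons_succ]
      rw [ih j (by simpa using hi)]; ring

theorem count_set_true (l : List Bool) (i : Nat) (h : l.getD i false = false) (hi : i < l.length) :
    (l.set i true).count false + 1 = l.count false := by
  induction l generalizing i with
  | nil => simp at hi
  | cons a t ih =>
    cases i with
    | zero => simp_all
    | succ j =>
      simp only [List.set, List.count_cons]
      have := ih j (by simpa using h) (by simpa using hi)
      omega

theorem lookup_mem (l : List (Int × List Int)) (k : Int) (vs : List Int)
    (h : l.lookup k = some vs) : ∃ p ∈ l, p.2 = vs := by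
  induction l with
  | nil => simp [List.lookup] at h
  | cons p t ih =>
    cases hk : k == p.1
    · rw [List.lookup_cons, hk] at h
      obtain ⟨q, hq, he⟩ := ih h
      exact ⟨q, by simp [hq], he⟩
    · rw [List.lookup_cons, hk] at h
      exact ⟨p, by simp, Option.some.inj h⟩

theorem pyGraphGet_subset (graph : List (Int × List Int)) (k v : Int)
    (h : v ∈ pyGraphGet graph k) : v ∈ graph.flatMap Prod.snd := by
  unfold pyGraphGet at h
  cases hlk : graph.lookup k with
  | none => rw [hlk] at h; simp at h
  | some vs =>
    rw [hlk] at h; simp at h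
    obtain ⟨p, hp, rfl⟩ := lookup_mem graph k vs hlk
    exact List.mem_flatMap.2 ⟨p, hp, h⟩

theorem mem_reachStep (graph : List (Int × List Int)) (S : List Int) (x : Int) :
    x ∈ reachStep graph S ↔ x ∈ S ∨ ∃ y ∈ S, x ∈ pyGraphGet graph y := by
  simp [reachStep, List.mem_append, List.mem_flatMap]

theorem nodup_reachStep (graph : List (Int × List Int)) (S : List Int) :
    (reachStep graph S).Nodup := PySem.List.nodup_dedup _

theorem reachStep_congr (graph : List (Int × List Int)) (S T : List Int)
    (h : ∀ x, x ∈ S ↔ x ∈ T) (x : Int) :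
    x ∈ reachStep graph S ↔ x ∈ reachStep graph T := by
  rw [mem_reachStep, mem_reachStep]
  constructor
  · rintro (hx | ⟨y, hy, hxy⟩)
    · exact Or.inl ((h x).1 hx)
    · exact Or.inr ⟨y, (h y).1 hy, hxy⟩
  · rintro (hx | ⟨y, hy, hxy⟩)
    · exact Or.inl ((h x).2 hx)
    · exact Or.inr ⟨y, (h y).2 hy, hxy⟩

-- g k below is (reachStep graph)^[k] [root]

theorem reach_mem_univ (graph : List (Int × List Int)) (root : Int) :
    ∀ k : Nat, ∀ x ∈ (reachStep graph)^[k] [root], x ∈ root :: graph.flatMap Prod.snd := by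
  intro k
  induction k with
  | zero => intro x hx; simp at hx; simp [hx]
  | succ m ih =>
    intro x hx
    rw [Function.iterate_succ_apply'] at hx
    rcases (mem_reachStep _ _ _).1 hx with hx | ⟨y, _, hxy⟩
    · exact ih x hx
    · exact List.mem_cons_of_mem _ (pyGraphGet_subset graph y x hxy)

theorem reach_nodup (graph : List (Int × List Int)) (root : Int) :
    ∀ k : Nat, ((reachStep graph)^[k] [root]).Nodup := by
  intro k
  cases k with
  | zero => simp
  | succ m => rw [Function.iterate_succ_apply']; exact nodup_reachStep _ _

theorem reach_sub_succ (graph : List (Int × List Int)) (root : Int) (k : Nat) :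
    ∀ x ∈ (reachStep graph)^[k] [root], x ∈ (reachStep graph)^[k+1] [root] := by
  intro x hx
  rw [Function.iterate_succ_apply']
  exact (mem_reachStep _ _ _).2 (Or.inl hx)

theorem reach_stab_propagate (graph : List (Int × List Int)) (root : Int) (j : Nat)
    (hstab : ∀ x, x ∈ (reachStep graph)^[j+1] [root] ↔ x ∈ (reachStep graph)^[j] [root]) :
    ∀ m : Nat, ∀ x, x ∈ (reachStep graph)^[j+m] [root] ↔ x ∈ (reachStep graph)^[j] [root] := by
  intro m
  induction m with
  | zero => intro x; rfl
  | succ i ih =>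
    intro x
    have h1 : j + (i + 1) = (j + i) + 1 := by omega
    rw [h1, Function.iterate_succ_apply' (reachStep graph) (j + i) [root]]
    rw [reachStep_congr graph _ _ ih x]
    rw [← Function.iterate_succ_apply' (reachStep graph) j [root]]
    exact hstab x

theorem reach_grow (graph : List (Int × List Int)) (root : Int) :
    ∀ k : Nat, (∀ j < k, ¬ (∀ x, x ∈ (reachStep graph)^[j+1] [root] ↔ x ∈ (reachStep graph)^[j] [root])) →
      k + 1 ≤ ((reachStep graph)^[k] [root]).length := by
  intro k
  induction k with
  | zero => intro _; simp
  | succ m ih =>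
    intro h
    have hm := ih (fun j hj => h j (by omega))
    have hsub : (reachStep graph)^[m] [root] ⊆ (reachStep graph)^[m+1] [root] :=
      fun x hx => reach_sub_succ graph root m x hx
    have hsp : ((reachStep graph)^[m] [root]).Subperm ((reachStep graph)^[m+1] [root]) :=
      List.Nodup.subperm (reach_nodup graph root m) hsub
    have hlen := hsp.length_le
    by_cases heq : ((reachStep graph)^[m+1] [root]).length ≤ ((reachStep graph)^[m] [root]).length
    · exfalso
      apply h m (by omega)
      intro x
      have hperm := List.Subperm.perm_of_length_le hsp heq
      exact ⟨fun hx => hperm.mem_iff.2 hx, fun hx => hperm.mem_iff.1 hx⟩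
    · omega

theorem reach_root (graph : List (Int × List Int)) (root : Int) :
    root ∈ reachSet graph root := by
  unfold reachSet
  generalize (graph.flatMap Prod.snd).length + 1 = k
  induction k with
  | zero => simp
  | succ m ih => exact reach_sub_succ graph root m root ih

theorem reach_closed (graph : List (Int × List Int)) (root : Int) :
    ∀ x ∈ reachSet graph root, ∀ v ∈ pyGraphGet graph x, v ∈ reachSet graph root := by
  intro x hx v hv
  set K := (graph.flatMap Prod.snd).length + 1 with hK
  -- some j < K has a stabilised step
  have hex : ∃ j < K, (∀ y, y ∈ (reachStep graph)^[j+1] [root] ↔ y ∈ (reachStep graph)^[j] [root]) := by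
    by_contra hno
    have := reach_grow graph root K (fun j hj hiff => hno ⟨j, hj, hiff⟩)
    have hlenK : ((reachStep graph)^[K] [root]).length ≤ K := by
      have hsp : ((reachStep graph)^[K] [root]).Subperm (root :: graph.flatMap Prod.snd) :=
        List.Nodup.subperm (reach_nodup graph root K) (fun y hy => reach_mem_univ graph root K y hy)
      have := hsp.length_le
      simpa [hK] using this
    omega
  obtain ⟨j, hjK, hstab⟩ := hex
  have hprop := reach_stab_propagate graph root j hstab
  have hKj : K = j + (K - j) := by omega
  have hxj : x ∈ (reachStep graph)^[j] [root] := by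
    have : x ∈ (reachStep graph)^[j + (K - j)] [root] := by
      rw [← hKj]; exact hx
    exact (hprop (K - j) x).1 this
  have hvj1 : v ∈ (reachStep graph)^[j+1] [root] := by
    rw [Function.iterate_succ_apply']
    exact (mem_reachStep _ _ _).2 (Or.inr ⟨x, hxj, hv⟩)
  have hvj : v ∈ (reachStep graph)^[j] [root] := (hstab v).1 hvj1
  show v ∈ (reachStep graph)^[K] [root]
  rw [hKj]
  exact (hprop (K - j) v).2 hvj

-- B's computation seen from the middle of a level: visited set S, remaining frontier fr,
-- next level built so far nf, fB fuel left for the following levels.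

-- B's computation seen from the middle of a level: visited array vis, remaining frontier fr,
-- next level built so far nf, fB fuel left for the following levels.
def contB (graph : List (Int × List Int)) (fB : Nat) (vis : List Bool) (fr nf : List Int) (dep t : Int) : Int :=
  match fr, nf with
  | [], [] => t
  | _, _ =>
    let p := levelB graph fr vis nf
    loopB graph fB p.1 p.2 (dep + 1) (t + (dep + 1) * (p.2.length : Int))

-- the simulation invariant tying A's (bacon, visited, queue = fr ++ nf) to B's level state
def BfsInv (n : Nat) (RS : List Int) (bac : List Int) (vis : List Bool)
    (fr nf : List Int) (dep t : Int) : Prop :=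
  (∀ x ∈ fr, x ∈ RS) ∧ (∀ x ∈ nf, x ∈ RS) ∧
  bac.length = n + 1 ∧ vis.length = n + 1 ∧
  (∀ x ∈ fr, vis.getD (pyIdx (n+1) x) false = true ∧ bac.getD (pyIdx (n+1) x) 0 = dep) ∧
  (∀ x ∈ nf, vis.getD (pyIdx (n+1) x) false = true ∧ bac.getD (pyIdx (n+1) x) 0 = dep + 1) ∧
  (∀ i : Nat, vis.getD i false = false → bac.getD i 0 = 0) ∧
  bac.sum = t + (dep + 1) * (nf.length : Int)

-- one dequeued node: A's inner friend loop and B's inner friend loop walk the SAME visited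
-- array in lockstep, appending the same newly discovered labels.
theorem visit_pair (n : Nat) (RS : List Int) (cur dep : Int) :
    ∀ (ns : List Int), (∀ v ∈ ns, pyIdx (n+1) v < n + 1) → (∀ v ∈ ns, v ∈ RS) →
    ∀ (bac : List Int) (vis : List Bool) (nf q : List Int),
    bac.length = n + 1 → vis.length = n + 1 →
    (vis.getD (pyIdx (n+1) cur) false = true ∧ bac.getD (pyIdx (n+1) cur) 0 = dep) →
    (∀ i : Nat, vis.getD i false = false → bac.getD i 0 = 0) →
    ∃ (bac' : List Int) (vis' : List Bool) (new : List Int),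
      visitA (n+1) cur ns (bac, vis, q) = (bac', vis', q ++ new) ∧
      visitB (n+1) vis nf ns = (vis', nf ++ new) ∧
      (∀ v ∈ new, v ∈ RS) ∧
      bac'.length = n + 1 ∧ vis'.length = n + 1 ∧
      (∀ x : Int, vis.getD (pyIdx (n+1) x) false = true →
        vis'.getD (pyIdx (n+1) x) false = true ∧
        bac'.getD (pyIdx (n+1) x) 0 = bac.getD (pyIdx (n+1) x) 0) ∧
      (∀ x ∈ new, vis'.getD (pyIdx (n+1) x) false = true ∧ bac'.getD (pyIdx (n+1) x) 0 = dep + 1) ∧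
      (∀ i : Nat, vis'.getD i false = false → bac'.getD i 0 = 0) ∧
      bac'.sum = bac.sum + (dep + 1) * (new.length : Int) ∧
      vis'.count false + new.length = vis.count false := by
  intro ns
  induction ns with
  | nil =>
    intro _ _ bac vis nf q hbl hvl _ hz
    exact ⟨bac, vis, [], by simp [visitA], by simp [visitB], by simp, hbl, hvl,
      fun x hx => ⟨hx, rfl⟩, by simp, hz, by simp, by simp⟩
  | cons f fs ih =>
    intro hns hnsR bac vis nf q hbl hvl hcur hz
    have hflt : pyIdx (n+1) f < vis.length := by rw [hvl]; exact hns f (by simp)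
    have hfltb : pyIdx (n+1) f < bac.length := by rw [hbl]; exact hns f (by simp)
    have hreads : vis.getD (pyIdx (n+1) f) true = vis.getD (pyIdx (n+1) f) false := by
      simp [List.getD, hflt]
    have hfs : ∀ v ∈ fs, pyIdx (n+1) v < n + 1 := fun v hv => hns v (by simp [hv])
    have hfsR : ∀ v ∈ fs, v ∈ RS := fun v hv => hnsR v (by simp [hv])
    by_cases hv : vis.getD (pyIdx (n+1) f) false = true
    · -- already visited: both skip
      have hA : visitA (n+1) cur (f :: fs) (bac, vis, q) = visitA (n+1) cur fs (bac, vis, q) := by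
        show (if vis.getD (pyIdx (n+1) f) true = false then _ else _) = _
        rw [hreads, hv]; simp
      have hB : visitB (n+1) vis nf (f :: fs) = visitB (n+1) vis nf fs := by
        show (if vis.getD (pyIdx (n+1) f) true = false then _ else _) = _
        rw [hreads, hv]; simp
      rw [hA, hB]
      exact ih hfs hfsR bac vis nf q hbl hvl hcur hz
    · -- unvisited: both mark f and append it
      have hvf : vis.getD (pyIdx (n+1) f) false = false := by simpa using hv
      have hidx_ne : ∀ x : Int, vis.getD (pyIdx (n+1) x) false = true →
          pyIdx (n+1) x ≠ pyIdx (n+1) f := by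
        intro x hx he
        rw [← he, hx] at hvf
        simp at hvf
      have hA : visitA (n+1) cur (f :: fs) (bac, vis, q) =
          visitA (n+1) cur fs (bac.set (pyIdx (n+1) f) (dep + 1), vis.set (pyIdx (n+1) f) true, q ++ [f]) := by
        show (if vis.getD (pyIdx (n+1) f) true = false then _ else _) = _
        rw [hreads, hvf, if_pos rfl, hcur.2]
      have hB : visitB (n+1) vis nf (f :: fs) =
          visitB (n+1) (vis.set (pyIdx (n+1) f) true) (nf ++ [f]) fs := by
        show (if vis.getD (pyIdx (n+1) f) true = false then _ else _) = _
        rw [hreads, hvf, if_pos rfl]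
      rw [hA, hB]
      set bac2 := bac.set (pyIdx (n+1) f) (dep + 1) with hb2
      set vis2 := vis.set (pyIdx (n+1) f) true with hv2
      have hbl2 : bac2.length = n + 1 := by simp [hb2, hbl]
      have hvl2 : vis2.length = n + 1 := by simp [hv2, hvl]
      have hpres2 : ∀ x : Int, vis.getD (pyIdx (n+1) x) false = true →
          vis2.getD (pyIdx (n+1) x) false = true ∧
          bac2.getD (pyIdx (n+1) x) 0 = bac.getD (pyIdx (n+1) x) 0 := by
        intro x hx
        constructor
        · rw [hv2, getD_set_of_ne _ _ _ _ _ (fun h => hidx_ne x hx h.symm)]; exact hx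
        · rw [hb2, getD_set_of_ne _ _ _ _ _ (fun h => hidx_ne x hx h.symm)]
      have hcur2 : vis2.getD (pyIdx (n+1) cur) false = true ∧ bac2.getD (pyIdx (n+1) cur) 0 = dep := by
        obtain ⟨hm, hb⟩ := hpres2 cur hcur.1
        exact ⟨hm, by rw [hb]; exact hcur.2⟩
      have hz2 : ∀ i : Nat, vis2.getD i false = false → bac2.getD i 0 = 0 := by
        intro i hi
        have hif : i ≠ pyIdx (n+1) f := by
          intro h
          rw [h, hv2, getD_set_self _ _ _ _ hflt] at hi
          simp at hi
        rw [hv2, getD_set_of_ne _ _ _ _ _ (fun h => hif h.symm)] at hi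
        rw [hb2, getD_set_of_ne _ _ _ _ _ (fun h => hif h.symm)]
        exact hz i hi
      have hfmark : vis2.getD (pyIdx (n+1) f) false = true ∧ bac2.getD (pyIdx (n+1) f) 0 = dep + 1 := by
        exact ⟨by rw [hv2, getD_set_self _ _ _ _ hflt],
               by rw [hb2, getD_set_self _ _ _ _ hfltb]⟩
      obtain ⟨bac', vis', new, eA, eB, c0, c1, c2, c3, c4, c5, c6, c7⟩ :=
        ih hfs hfsR bac2 vis2 (nf ++ [f]) (q ++ [f]) hbl2 hvl2 hcur2 hz2
      refine ⟨bac', vis', f :: new, ?_, ?_, ?_, c1, c2, ?_, ?_, c5, ?_, ?_⟩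
      · rw [eA]; simp
      · rw [eB]; simp
      · intro v hv'
        rcases List.mem_cons.1 hv' with rfl | hv'
        · exact hnsR v (by simp)
        · exact c0 v hv'
      · -- preservation from the original state
        intro x hx
        obtain ⟨hm2, hb2'⟩ := hpres2 x hx
        obtain ⟨hm', hb'⟩ := c3 x hm2
        exact ⟨hm', by rw [hb', hb2']⟩
      · -- the new labels carry depth dep+1
        intro x hx
        rcases List.mem_cons.1 hx with rfl | hx
        · obtain ⟨hm', hb'⟩ := c3 x hfmark.1
          exact ⟨hm', by rw [hb', hfmark.2]⟩
        · exact c4 x hx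
      · -- sum
        have hs2 : bac2.sum = bac.sum + (dep + 1) := by
          rw [hb2, sum_set_int _ _ _ hfltb, hz (pyIdx (n+1) f) hvf]; ring
        rw [c6, hs2]; simp only [List.length_cons]; push_cast; ring
      · -- count
        have hc2' : vis2.count false + 1 = vis.count false := count_set_true vis (pyIdx (n+1) f) hvf hflt
        simp only [List.length_cons]; omega

theorem contB_shift (graph : List (Int × List Int)) (fB : Nat) (vis : List Bool)
    (x : Int) (xs : List Int) (dep t : Int) :
    contB graph (fB + 1) vis [] (x :: xs) dep t =
      contB graph fB vis (x :: xs) [] (dep + 1) (t + (dep + 1) * ((x :: xs).length : Int)) := by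
  simp only [contB, levelB, loopB]

theorem contB_step (graph : List (Int × List Int)) (fB : Nat) (vis : List Bool)
    (cur : Int) (rest nf : List Int) (dep t : Int) :
    contB graph fB vis (cur :: rest) nf dep t =
      contB graph fB (visitB (graph.length + 1) vis nf (pyGraphGet graph cur)).1 rest
        (visitB (graph.length + 1) vis nf (pyGraphGet graph cur)).2 dep t := by
  cases hr : rest with
  | nil =>
    cases hn : (visitB (graph.length + 1) vis nf (pyGraphGet graph cur)).2 with
    | nil => simp only [contB, levelB, hn, List.length_nil]
             cases fB <;> simp [loopB]
    | cons y ys => simp only [contB, levelB, hn]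
  | cons r rs => simp only [contB, levelB]

theorem step_sim (graph : List (Int × List Int)) (RS : List Int)
    (hval : ∀ x ∈ RS, pyIdx (graph.length + 1) x < graph.length + 1)
    (hcl : ∀ x ∈ RS, ∀ v ∈ pyGraphGet graph x, v ∈ RS) (m : Nat)
    (IH : ∀ (fB : Nat) (bac : List Int) (vis : List Bool)
      (fr nf : List Int) (dep t : Int),
      BfsInv graph.length RS bac vis fr nf dep t →
      2 * vis.count false + (fr.length + nf.length) + 1 ≤ m →
      vis.count false + 2 + (if nf = [] then 0 else 1) ≤ fB →
      (loopA graph m (bac, vis, fr ++ nf)).sum = contB graph fB vis fr nf dep t) :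
    ∀ (fB : Nat) (bac : List Int) (vis : List Bool)
      (cur : Int) (rest nf : List Int) (dep t : Int),
    BfsInv graph.length RS bac vis (cur :: rest) nf dep t →
    2 * vis.count false + ((cur :: rest).length + nf.length) + 1 ≤ m + 1 →
    vis.count false + 2 + (if nf = [] then 0 else 1) ≤ fB →
    (loopA graph (m + 1) (bac, vis, (cur :: rest) ++ nf)).sum = contB graph fB vis (cur :: rest) nf dep t := by
  intro fB bac vis cur rest nf dep t hinv h1 h2
  obtain ⟨hfrR, hnfR, hbl, hvl, hfr, hnf, hz, hsum⟩ := hinv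
  have hcurR : cur ∈ RS := hfrR cur (by simp)
  obtain ⟨bac', vis', new, eA, eB, c0, c1, c2, c3, c4, c5, c6, c7⟩ :=
    visit_pair graph.length RS cur dep (pyGraphGet graph cur)
      (fun v hv => hval v (hcl cur hcurR v hv)) (hcl cur hcurR) bac vis nf (rest ++ nf)
      hbl hvl (hfr cur (by simp)) hz
  have hlhs : loopA graph (m + 1) (bac, vis, (cur :: rest) ++ nf)
      = loopA graph m (bac', vis', rest ++ (nf ++ new)) := by
    show loopA graph m (visitA (graph.length + 1) cur (pyGraphGet graph cur) (bac, vis, rest ++ nf)) = _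
    rw [eA, List.append_assoc]
  rw [hlhs, contB_step, eB]
  apply IH
  · refine ⟨fun x hx => hfrR x (by simp [hx]), ?_, c1, c2, ?_, ?_, c5, ?_⟩
    · intro x hx
      rcases List.mem_append.1 hx with hx | hx
      · exact hnfR x hx
      · exact c0 x hx
    · intro x hx
      obtain ⟨hm0, hb0⟩ := hfr x (by simp [hx])
      obtain ⟨hm', hb'⟩ := c3 x hm0
      exact ⟨hm', by rw [hb']; exact hb0⟩
    · intro x hx
      rcases List.mem_append.1 hx with hx | hx
      · obtain ⟨hm0, hb0⟩ := hnf x hx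
        obtain ⟨hm', hb'⟩ := c3 x hm0
        exact ⟨hm', by rw [hb']; exact hb0⟩
      · exact c4 x hx
    · rw [c6, hsum]
      simp only [List.length_append]
      push_cast; ring
  · simp only [List.length_cons, List.length_append] at h1 ⊢
    omega
  · rcases new with _ | ⟨a, as⟩
    · simp only [List.length_nil, Nat.add_zero] at c7
      rw [List.append_nil]
      generalize hif : (if nf = ([] : List Int) then 0 else 1) = e at h2 ⊢
      omega
    · have hne : nf ++ a :: as ≠ [] := by simp
      rw [if_neg hne]
      have hle : (if nf = [] then 0 else 1) ≤ 1 := by split <;> omega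
      simp only [List.length_cons] at c7
      omega

theorem main_sim (graph : List (Int × List Int)) (RS : List Int)
    (hval : ∀ x ∈ RS, pyIdx (graph.length + 1) x < graph.length + 1)
    (hcl : ∀ x ∈ RS, ∀ v ∈ pyGraphGet graph x, v ∈ RS) :
    ∀ (fA fB : Nat) (bac : List Int) (vis : List Bool)
      (fr nf : List Int) (dep t : Int),
    BfsInv graph.length RS bac vis fr nf dep t →
    2 * vis.count false + (fr.length + nf.length) + 1 ≤ fA →
    vis.count false + 2 + (if nf = [] then 0 else 1) ≤ fB →
    (loopA graph fA (bac, vis, fr ++ nf)).sum = contB graph fB vis fr nf dep t := by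
  intro fA
  induction fA with
  | zero => intro fB bac vis fr nf dep t _ h1 _; omega
  | succ m ihm =>
    intro fB bac vis fr nf dep t hinv h1 h2
    rcases fr with _ | ⟨cur, rest⟩
    · rcases nf with _ | ⟨x, xs⟩
      · obtain ⟨_, _, _, _, _, _, _, hsum⟩ := hinv
        show bac.sum = t
        rw [hsum]; simp
      · obtain ⟨fB', rfl⟩ : ∃ k, fB = k + 1 := ⟨fB - 1, by omega⟩
        rw [contB_shift]
        obtain ⟨_, hnfR, hbl, hvl, _, hnf, hz, hsum⟩ := hinv
        have : ([] : List Int) ++ x :: xs = (x :: xs) ++ [] := by simp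
        rw [this]
        apply step_sim graph RS hval hcl m ihm
        · refine ⟨hnfR, by simp, hbl, hvl, hnf, by simp, hz, ?_⟩
          rw [hsum]; simp only [List.length_nil, List.length_cons]; push_cast; ring
        · simp only [List.length_cons, List.length_nil] at h1 ⊢; omega
        · rw [if_neg (by simp : (x :: xs : List Int) ≠ [])] at h2
          simp
          omega
    · exact step_sim graph RS hval hcl m ihm fB bac vis cur rest nf dep t hinv h1 h2

theorem bacon_agree (graph : List (Int × List Int)) (root : Int) (hpre : Pre_bacon graph root) :
    bacon graph root = bacon_alt graph root := by
  obtain ⟨-, hreach⟩ := hpre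
  have hval : ∀ x ∈ reachSet graph root, pyIdx (graph.length + 1) x < graph.length + 1 := by
    intro x hx
    obtain ⟨h1, h2, -⟩ := hreach x hx
    unfold pyIdx
    split <;> omega
  have hrootR : root ∈ reachSet graph root := reach_root graph root
  have hrlt : pyIdx (graph.length + 1) root < graph.length + 1 := hval root hrootR
  have halt : bacon_alt graph root =
      contB graph (graph.length + 2)
        ((List.replicate (graph.length + 1) false).set (pyIdx (graph.length + 1) root) true)
        [root] [] 0 0 := by
    show loopB graph ((graph.length + 2) + 1) _ _ _ _ = _
    simp [loopB, contB]
  rw [bacon, halt]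
  have hvis0 : ((List.replicate (graph.length + 1) false).set (pyIdx (graph.length + 1) root) true).count false
      + 1 = graph.length + 1 := by
    rw [count_set_true _ _ (by simp [hrlt]) (by simpa using hrlt)]
    simp
  refine main_sim graph (reachSet graph root) hval (reach_closed graph root)
    (2 * graph.length + 4) (graph.length + 2)
    _ _ [root] [] 0 0 ⟨?_, by simp, by simp, by simp, ?_, by simp, ?_, by simp⟩ ?_ ?_
  · intro x hx
    simp only [List.mem_singleton] at hx
    subst hx
    exact hrootR
  · intro x hx
    simp only [List.mem_singleton] at hx
    subst hx
    exact ⟨by rw [getD_set_self _ _ _ _ (by simpa using hrlt)], by simp⟩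
  · intro i _
    simp
  · simp only [List.length_cons, List.length_nil]
    omega
  · simp
    omega

-- ===== VERDICT (by name: the statement is the Claim_ definition above) =====
theorem bacon_spec : Claim_equal_bacon := by
  intro graph root _ hpre
  unfold Spec_bacon
  exact bacon_agree graph root hpre
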